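-- pv_equiv track=rewrite | github.com/allielas/hap1_screen_codes | plate_preprocessing.py | make_feature_dict
-- ===== SOURCE A (Python) =====
-- def make_feature_dict(columns_list):
--     """
--     Create a dictionary of features from the columns list.
--     Args:
--         columns_list (list): List of column names from the DataFrame.
--     Returns:
--         dict: A dictionary with keys as feature types and values as lists of corresponding column names."""
--     # Add the different types of features to a dictionary
--     feature_dict = {
--         "intensity": [],
--         "texture": [],
--         "areashape": [],
--         "granularity": [],
--         "radialdistribution": [],
--         "totals": [],
--         "count": [],
--         "distance": [],
--         "per_cell_area": [],
--         "coloc": [],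
--         "other": [],
--     }
--     for col in columns_list:
--         if "Texture" in col:
--             feature_dict["texture"].append(col)
--         elif "Intensity" in col:
--             feature_dict["intensity"].append(col)
--         elif "Math_" in col or "Corr_" in col:
--             feature_dict["totals"].append(col)
--         elif "Count" in col:
--             feature_dict["count"].append(col)
--         elif "AreaShape" in col:
--             feature_dict["areashape"].append(col)
--         elif "Distance" in col:
--             feature_dict["distance"].append(col)
--         elif "PerCell" in col:
--             feature_dict["per_cell_area"].append(col)
--         elif "Granularity" in col:
--             feature_dict["granularity"].append(col)
--         elif "RadialDistribution" in col:
--             feature_dict["radialdistribution"].append(col)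
--         elif "Lysosomes_Mitochondria_Ratio" in col:
--             feature_dict["coloc"].append(col)
--         else:
--             feature_dict["other"].append(col)
--
--     return feature_dict
-- ===== SOURCE B (Python) =====
-- # B: staged passes -- each category is built by its own filter over the whole
-- # column list ("matches my substrings and no higher-precedence rule matches"),
-- # instead of dispatching each column through a first-match chain.
-- _RULES = [            # precedence order (A's elif order)
--     ("texture", ("Texture",)),
--     ("intensity", ("Intensity",)),
--     ("totals", ("Math_", "Corr_")),
--     ("count", ("Count",)),
--     ("areashape", ("AreaShape",)),
--     ("distance", ("Distance",)),
--     ("per_cell_area", ("PerCell",)),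
--     ("granularity", ("Granularity",)),
--     ("radialdistribution", ("RadialDistribution",)),
--     ("coloc", ("Lysosomes_Mitochondria_Ratio",)),
-- ]
--
-- _OUT_ORDER = ["intensity", "texture", "areashape", "granularity", "radialdistribution",
--               "totals", "count", "distance", "per_cell_area", "coloc", "other"]
--
--
-- def _hit(col, subs):
--     return any(s in col for s in subs)
--
--
-- def make_feature_dict(columns_list):
--     buckets = {}
--     for i, (key, subs) in enumerate(_RULES):
--         earlier = [s for _, s in _RULES[:i]]
--         buckets[key] = [c for c in columns_list
--                         if _hit(c, subs) and not any(_hit(c, e) for e in earlier)]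
--     buckets["other"] = [c for c in columns_list
--                         if not any(_hit(c, s) for _, s in _RULES)]
--     return {k: buckets[k] for k in _OUT_ORDER}
-- ===== Notes on version B (the rewrite author's own statement) =====
-- stated objective: alternative
-- what changed: Instead of dispatching each column through a first-match elif chain into mutable buckets, B builds every category independently by its own filter pass over the whole list (predicate: my substrings match and no higher-precedence rule matches), then assembles the dict from the finished buckets.
import Mathlib
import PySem

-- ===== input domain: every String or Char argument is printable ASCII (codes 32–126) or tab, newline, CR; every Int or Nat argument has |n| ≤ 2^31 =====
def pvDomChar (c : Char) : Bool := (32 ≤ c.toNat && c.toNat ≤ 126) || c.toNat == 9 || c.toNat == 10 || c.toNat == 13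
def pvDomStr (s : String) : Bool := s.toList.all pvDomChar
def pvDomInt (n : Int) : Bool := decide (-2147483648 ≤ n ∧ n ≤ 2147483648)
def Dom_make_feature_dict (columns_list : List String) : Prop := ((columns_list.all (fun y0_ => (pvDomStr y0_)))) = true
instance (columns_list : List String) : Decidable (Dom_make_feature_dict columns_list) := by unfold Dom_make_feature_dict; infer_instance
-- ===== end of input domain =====

-- B builds every category by its own filter pass over the whole list (match my substrings and no
-- higher-precedence rule matches) instead of A's per-column first-match elif chain; alternative decomposition.

-- ===== PORT A =====
-- the seeded dict literal of A
def pvInitDict : PySem.Dict String (List String) :=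
  PySem.Dict.ofList [("intensity", []), ("texture", []), ("areashape", []),
    ("granularity", []), ("radialdistribution", []), ("totals", []),
    ("count", []), ("distance", []), ("per_cell_area", []), ("coloc", []), ("other", [])]

def make_feature_dict (columns_list : List String) : List (String × List String) :=
  (columns_list.foldl (fun d col =>
    if PySem.Str.isIn "Texture" col then d.modify "texture" [] (· ++ [col])
    else if PySem.Str.isIn "Intensity" col then d.modify "intensity" [] (· ++ [col])
    else if PySem.Str.isIn "Math_" col || PySem.Str.isIn "Corr_" col then d.modify "totals" [] (· ++ [col])
    else if PySem.Str.isIn "Count" col then d.modify "count" [] (· ++ [col])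
    else if PySem.Str.isIn "AreaShape" col then d.modify "areashape" [] (· ++ [col])
    else if PySem.Str.isIn "Distance" col then d.modify "distance" [] (· ++ [col])
    else if PySem.Str.isIn "PerCell" col then d.modify "per_cell_area" [] (· ++ [col])
    else if PySem.Str.isIn "Granularity" col then d.modify "granularity" [] (· ++ [col])
    else if PySem.Str.isIn "RadialDistribution" col then d.modify "radialdistribution" [] (· ++ [col])
    else if PySem.Str.isIn "Lysosomes_Mitochondria_Ratio" col then d.modify "coloc" [] (· ++ [col])
    else d.modify "other" [] (· ++ [col])) pvInitDict).items

-- ===== PORT B =====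
-- _RULES of Source B (precedence order)
def pvRules : List (String × List String) :=
  [("texture", ["Texture"]), ("intensity", ["Intensity"]), ("totals", ["Math_", "Corr_"]),
   ("count", ["Count"]), ("areashape", ["AreaShape"]), ("distance", ["Distance"]),
   ("per_cell_area", ["PerCell"]), ("granularity", ["Granularity"]),
   ("radialdistribution", ["RadialDistribution"]), ("coloc", ["Lysosomes_Mitochondria_Ratio"])]

-- _OUT_ORDER of Source B
def pvOutOrder : List String :=
  ["intensity", "texture", "areashape", "granularity", "radialdistribution",
   "totals", "count", "distance", "per_cell_area", "coloc", "other"]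

-- _hit(col, subs)
def pvHit (col : String) (subs : List String) : Bool := subs.any (fun s => PySem.Str.isIn s col)

def make_feature_dict_alt (columns_list : List String) : List (String × List String) :=
  -- for i, (key, subs) in enumerate(_RULES): one filter pass per rule; _RULES[:i] is the slice
  let buckets := (PySem.List.enumerate pvRules).foldl (fun (b : PySem.Dict String (List String)) p =>
      let earlier := (PySem.List.slice pvRules none (some p.1)).map (·.2)
      b.insert p.2.1 (columns_list.filter (fun c =>
        pvHit c p.2.2 && !(earlier.any (fun e => pvHit c e)))))
    PySem.Dict.empty
  let buckets := buckets.insert "other"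
    (columns_list.filter (fun c => !(pvRules.any (fun r => pvHit c r.2))))
  (PySem.Dict.ofList (pvOutOrder.map (fun k => (k, buckets.getD k [])))).items

-- ===== PRECONDITION & SPEC =====
def Spec_make_feature_dict (columns_list : List String) (out : List (String × List String)) : Prop := out = make_feature_dict_alt columns_list
instance (columns_list : List String) (out : List (String × List String)) : Decidable (Spec_make_feature_dict columns_list out) := by unfold Spec_make_feature_dict; infer_instance

-- ===== CLAIM (what is proved, stated in full; the proofs are below) =====
def Claim_equal_make_feature_dict : Prop := ∀ (columns_list : List String), Dom_make_feature_dict columns_list → Spec_make_feature_dict columns_list (make_feature_dict columns_list)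

-- ===== LEMMAS AND PROOFS =====

-- proof helper: the key A's elif chain routes a column to
def pvClassify (col : String) : String :=
  if PySem.Str.isIn "Texture" col then "texture"
  else if PySem.Str.isIn "Intensity" col then "intensity"
  else if PySem.Str.isIn "Math_" col || PySem.Str.isIn "Corr_" col then "totals"
  else if PySem.Str.isIn "Count" col then "count"
  else if PySem.Str.isIn "AreaShape" col then "areashape"
  else if PySem.Str.isIn "Distance" col then "distance"
  else if PySem.Str.isIn "PerCell" col then "per_cell_area"
  else if PySem.Str.isIn "Granularity" col then "granularity"
  else if PySem.Str.isIn "RadialDistribution" col then "radialdistribution"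
  else if PySem.Str.isIn "Lysosomes_Mitochondria_Ratio" col then "coloc"
  else "other"

-- A's loop step is "modify at pvClassify col"
set_option maxHeartbeats 2000000 in
theorem pv_step_eq (d : PySem.Dict String (List String)) (col : String) :
    (if PySem.Str.isIn "Texture" col then d.modify "texture" [] (· ++ [col])
    else if PySem.Str.isIn "Intensity" col then d.modify "intensity" [] (· ++ [col])
    else if PySem.Str.isIn "Math_" col || PySem.Str.isIn "Corr_" col then d.modify "totals" [] (· ++ [col])
    else if PySem.Str.isIn "Count" col then d.modify "count" [] (· ++ [col])
    else if PySem.Str.isIn "AreaShape" col then d.modify "areashape" [] (· ++ [col])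
    else if PySem.Str.isIn "Distance" col then d.modify "distance" [] (· ++ [col])
    else if PySem.Str.isIn "PerCell" col then d.modify "per_cell_area" [] (· ++ [col])
    else if PySem.Str.isIn "Granularity" col then d.modify "granularity" [] (· ++ [col])
    else if PySem.Str.isIn "RadialDistribution" col then d.modify "radialdistribution" [] (· ++ [col])
    else if PySem.Str.isIn "Lysosomes_Mitochondria_Ratio" col then d.modify "coloc" [] (· ++ [col])
    else d.modify "other" [] (· ++ [col])) = d.modify (pvClassify col) [] (· ++ [col]) := by
  unfold pvClassify
  split_ifs <;> rfl

set_option maxHeartbeats 2000000 in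
theorem pvClassify_mem (c : String) : pvClassify c ∈ pvInitDict.keys := by
  unfold pvClassify
  split_ifs <;> decide

-- A's loop, written as a fold over (classify c, c) pairs, yields each key with its filtered columns
set_option maxHeartbeats 2000000 in
theorem pv_A_fold (cols : List String) :
    ((cols.map (fun c => (pvClassify c, c))).foldl
        (fun d p => d.modify p.1 [] (· ++ [p.2])) pvInitDict).items
      = pvInitDict.keys.map (fun k => (k, cols.filter (fun c => pvClassify c == k))) := by
  set F := (cols.map (fun c => (pvClassify c, c))).foldl
      (fun d p => d.modify p.1 [] (· ++ [p.2])) pvInitDict with hF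
  have hkeys : F.keys = pvInitDict.keys := by
    rw [hF]
    rw [show (fun (d : PySem.Dict String (List String)) p => d.modify p.1 [] (· ++ [p.2]))
        = (fun (d : PySem.Dict String (List String)) p => d.modify ((·.1 : String × String → String) p) [] ((fun (d : PySem.Dict String (List String)) (p : String × String) => (· ++ [p.2])) d p)) from rfl]
    rw [PySem.Dict.keys_foldl_modify_key]
    rw [PySem.Set.update_eq_append_filter]
    have : (PySem.Set.ofList ((cols.map (fun c => (pvClassify c, c))).map (·.1))).filter
        (fun y => !(PySem.Set.contains pvInitDict.keys y)) = [] := by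
      apply List.filter_eq_nil_iff.mpr
      intro y hy
      rw [PySem.Set.mem_ofList] at hy
      simp only [List.map_map, List.mem_map] at hy
      obtain ⟨c, _, rfl⟩ := hy
      have hm := pvClassify_mem c
      simp_all [PySem.Set.contains]
    rw [this, List.append_nil]
  have hnodup : F.keys.Nodup := by rw [hkeys]; decide
  rw [PySem.Dict.items_eq_map_keys F hnodup []]
  rw [hkeys]
  apply List.map_congr_left
  intro k hk
  have : F.getD k [] = pvInitDict.getD k [] ++
      (((cols.map (fun c => (pvClassify c, c))).filter (fun p => p.1 == k)).map (·.2)) := by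
    rw [hF]; exact PySem.Dict.getD_foldl_modify_append _ _ _
  rw [this]
  have hinit : pvInitDict.getD k [] = [] := by
    fin_cases hk <;> decide
  rw [hinit, List.nil_append, List.filter_map, List.map_map]
  simp [Function.comp_def]

-- generic shape of B's bucket dict: distinct literal keys read back in output order
theorem pv_alt_gen (v0 v1 v2 v3 v4 v5 v6 v7 v8 v9 vo : List String) :
    (PySem.Dict.ofList (pvOutOrder.map (fun k => (k,
      ((((((((((((PySem.Dict.empty.insert "texture" v0).insert "intensity" v1).insert "totals" v2).insert
        "count" v3).insert "areashape" v4).insert "distance" v5).insert "per_cell_area" v6).insert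
        "granularity" v7).insert "radialdistribution" v8).insert "coloc" v9).insert "other" vo)).getD k [])))).items
    = [("intensity", v1), ("texture", v0), ("areashape", v4), ("granularity", v7), ("radialdistribution", v8),
       ("totals", v2), ("count", v3), ("distance", v5), ("per_cell_area", v6), ("coloc", v9), ("other", vo)] := by
  simp [pvOutOrder, PySem.Dict.getD_insert, PySem.Dict.ofList,
    PySem.Dict.update, List.foldl_cons, List.foldl_nil,
    PySem.Dict.items_insert, PySem.Dict.contains_insert, PySem.Dict.empty]

-- the first-match key of A's chain vs. B's "my substrings and no earlier rule" predicates
set_option maxHeartbeats 4000000 in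
theorem pv_preds (c : String) :
    (pvClassify c == "intensity") = (pvHit c ["Intensity"] && !(([["Texture"]] : List (List String)).any (fun e => pvHit c e)))
  ∧ (pvClassify c == "texture") = (pvHit c ["Texture"] && !(([] : List (List String)).any (fun e => pvHit c e)))
  ∧ (pvClassify c == "areashape") = (pvHit c ["AreaShape"] && !(([["Texture"], ["Intensity"], ["Math_", "Corr_"], ["Count"]] : List (List String)).any (fun e => pvHit c e)))
  ∧ (pvClassify c == "granularity") = (pvHit c ["Granularity"] && !(([["Texture"], ["Intensity"], ["Math_", "Corr_"], ["Count"], ["AreaShape"], ["Distance"], ["PerCell"]] : List (List String)).any (fun e => pvHit c e)))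
  ∧ (pvClassify c == "radialdistribution") = (pvHit c ["RadialDistribution"] && !(([["Texture"], ["Intensity"], ["Math_", "Corr_"], ["Count"], ["AreaShape"], ["Distance"], ["PerCell"], ["Granularity"]] : List (List String)).any (fun e => pvHit c e)))
  ∧ (pvClassify c == "totals") = (pvHit c ["Math_", "Corr_"] && !(([["Texture"], ["Intensity"]] : List (List String)).any (fun e => pvHit c e)))
  ∧ (pvClassify c == "count") = (pvHit c ["Count"] && !(([["Texture"], ["Intensity"], ["Math_", "Corr_"]] : List (List String)).any (fun e => pvHit c e)))
  ∧ (pvClassify c == "distance") = (pvHit c ["Distance"] && !(([["Texture"], ["Intensity"], ["Math_", "Corr_"], ["Count"], ["AreaShape"]] : List (List String)).any (fun e => pvHit c e)))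
  ∧ (pvClassify c == "per_cell_area") = (pvHit c ["PerCell"] && !(([["Texture"], ["Intensity"], ["Math_", "Corr_"], ["Count"], ["AreaShape"], ["Distance"]] : List (List String)).any (fun e => pvHit c e)))
  ∧ (pvClassify c == "coloc") = (pvHit c ["Lysosomes_Mitochondria_Ratio"] && !(([["Texture"], ["Intensity"], ["Math_", "Corr_"], ["Count"], ["AreaShape"], ["Distance"], ["PerCell"], ["Granularity"], ["RadialDistribution"]] : List (List String)).any (fun e => pvHit c e)))
  ∧ (pvClassify c == "other") = !(pvRules.any (fun r => pvHit c r.2)) := by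
  unfold pvClassify
  split_ifs <;> simp_all [pvHit, pvRules]
  all_goals (rcases ‹_ ∨ _› with h | h <;> simp_all)

set_option maxHeartbeats 4000000 in
theorem make_feature_dict_spec' (cols : List String) :
    make_feature_dict cols = make_feature_dict_alt cols := by
  -- A side: normal form
  have hA : make_feature_dict cols
      = pvInitDict.keys.map (fun k => (k, cols.filter (fun c => pvClassify c == k))) := by
    unfold make_feature_dict
    rw [show (cols.foldl (fun d col =>
        if PySem.Str.isIn "Texture" col then d.modify "texture" [] (· ++ [col])
        else if PySem.Str.isIn "Intensity" col then d.modify "intensity" [] (· ++ [col])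
        else if PySem.Str.isIn "Math_" col || PySem.Str.isIn "Corr_" col then d.modify "totals" [] (· ++ [col])
        else if PySem.Str.isIn "Count" col then d.modify "count" [] (· ++ [col])
        else if PySem.Str.isIn "AreaShape" col then d.modify "areashape" [] (· ++ [col])
        else if PySem.Str.isIn "Distance" col then d.modify "distance" [] (· ++ [col])
        else if PySem.Str.isIn "PerCell" col then d.modify "per_cell_area" [] (· ++ [col])
        else if PySem.Str.isIn "Granularity" col then d.modify "granularity" [] (· ++ [col])
        else if PySem.Str.isIn "RadialDistribution" col then d.modify "radialdistribution" [] (· ++ [col])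
        else if PySem.Str.isIn "Lysosomes_Mitochondria_Ratio" col then d.modify "coloc" [] (· ++ [col])
        else d.modify "other" [] (· ++ [col])) pvInitDict)
        = ((cols.map (fun c => (pvClassify c, c))).foldl
            (fun d p => d.modify p.1 [] (· ++ [p.2])) pvInitDict) from by
      rw [List.foldl_map]
      congr 1
      funext d col
      exact pv_step_eq d col]
    exact pv_A_fold cols
  rw [hA]
  rw [show pvInitDict.keys = pvOutOrder from by decide]
  -- B side: bucket shape
  unfold make_feature_dict_alt
  rw [show PySem.List.enumerate pvRules
      = [((0:Int), ("texture", ["Texture"])), (1, ("intensity", ["Intensity"])), (2, ("totals", ["Math_", "Corr_"])),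
         (3, ("count", ["Count"])), (4, ("areashape", ["AreaShape"])), (5, ("distance", ["Distance"])),
         (6, ("per_cell_area", ["PerCell"])), (7, ("granularity", ["Granularity"])),
         (8, ("radialdistribution", ["RadialDistribution"])), (9, ("coloc", ["Lysosomes_Mitochondria_Ratio"]))] from by decide]
  simp only [List.foldl_cons, List.foldl_nil]
  rw [pv_alt_gen]
  -- the earlier-rule slices, evaluated
  rw [show (PySem.List.slice pvRules none (some 0)).map (·.2) = ([] : List (List String)) from by decide,
      show (PySem.List.slice pvRules none (some 1)).map (·.2) = [["Texture"]] from by decide,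
      show (PySem.List.slice pvRules none (some 2)).map (·.2) = [["Texture"], ["Intensity"]] from by decide,
      show (PySem.List.slice pvRules none (some 3)).map (·.2) = [["Texture"], ["Intensity"], ["Math_", "Corr_"]] from by decide,
      show (PySem.List.slice pvRules none (some 4)).map (·.2) = [["Texture"], ["Intensity"], ["Math_", "Corr_"], ["Count"]] from by decide,
      show (PySem.List.slice pvRules none (some 5)).map (·.2) = [["Texture"], ["Intensity"], ["Math_", "Corr_"], ["Count"], ["AreaShape"]] from by decide,
      show (PySem.List.slice pvRules none (some 6)).map (·.2) = [["Texture"], ["Intensity"], ["Math_", "Corr_"], ["Count"], ["AreaShape"], ["Distance"]] from by decide,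
      show (PySem.List.slice pvRules none (some 7)).map (·.2) = [["Texture"], ["Intensity"], ["Math_", "Corr_"], ["Count"], ["AreaShape"], ["Distance"], ["PerCell"]] from by decide,
      show (PySem.List.slice pvRules none (some 8)).map (·.2) = [["Texture"], ["Intensity"], ["Math_", "Corr_"], ["Count"], ["AreaShape"], ["Distance"], ["PerCell"], ["Granularity"]] from by decide,
      show (PySem.List.slice pvRules none (some 9)).map (·.2) = [["Texture"], ["Intensity"], ["Math_", "Corr_"], ["Count"], ["AreaShape"], ["Distance"], ["PerCell"], ["Granularity"], ["RadialDistribution"]] from by decide]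
  simp only [pvOutOrder, List.map_cons, List.map_nil]
  rw [List.filter_congr (fun c _ => (pv_preds c).1),
      List.filter_congr (fun c _ => (pv_preds c).2.1),
      List.filter_congr (fun c _ => (pv_preds c).2.2.1),
      List.filter_congr (fun c _ => (pv_preds c).2.2.2.1),
      List.filter_congr (fun c _ => (pv_preds c).2.2.2.2.1),
      List.filter_congr (fun c _ => (pv_preds c).2.2.2.2.2.1),
      List.filter_congr (fun c _ => (pv_preds c).2.2.2.2.2.2.1),
      List.filter_congr (fun c _ => (pv_preds c).2.2.2.2.2.2.2.1),
      List.filter_congr (fun c _ => (pv_preds c).2.2.2.2.2.2.2.2.1),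
      List.filter_congr (fun c _ => (pv_preds c).2.2.2.2.2.2.2.2.2.1),
      List.filter_congr (fun c _ => (pv_preds c).2.2.2.2.2.2.2.2.2.2)]

-- ===== VERDICT (by name: the statement is the Claim_ definition above) =====
theorem make_feature_dict_spec : Claim_equal_make_feature_dict := by
  intro columns_list _
  exact make_feature_dict_spec' columns_list
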